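-- pv_equiv track=rewrite | github.com/snipermike2/Mudhumeni | app.py | format_ussd_response
-- ===== SOURCE A (Python) =====
-- def format_ussd_response(response):
--     """Format AI response for USSD constraints"""
--     max_length = 120  # Conservative limit for USSD
--
--     if len(response) <= max_length:
--         return response
--
--     # Try to fit complete sentences
--     sentences = response.split('. ')
--     formatted_response = ""
--
--     for sentence in sentences:
--         if len(formatted_response + sentence + '. ') <= max_length:
--             formatted_response += sentence + '. '
--         else:
--             break
--
--     # If no complete sentences fit, truncate at word boundary
--     if not formatted_response.strip():
--         words = response.split()
--         formatted_response = ""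
--         for word in words:
--             if len(formatted_response + word + ' ') <= max_length - 3:
--                 formatted_response += word + ' '
--             else:
--                 break
--         formatted_response = formatted_response.strip() + "..."
--
--     return formatted_response.strip()
-- ===== SOURCE B (Python) =====
-- def format_ussd_response(response):
--     """Format AI response for USSD constraints (prefix-sum table version)."""
--     max_length = 120
--
--     if len(response) <= max_length:
--         return response
--
--     # Prefix-sum table over sentence segments: joining k sentences with '. '
--     # and appending the trailing '. ' costs sum(len(s) + 2 for first k).
--     sentences = response.split('. ')
--     cum = []
--     total = 0
--     for s in sentences:
--         total += len(s) + 2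
--         cum.append(total)
--     k = sum(1 for c in cum if c <= max_length)
--     if k > 0:
--         return ('. '.join(sentences[:k]) + '. ').strip()
--
--     # Nothing fits: same table over words with budget max_length - 3, then '...'.
--     words = response.split()
--     cum = []
--     total = 0
--     for w in words:
--         total += len(w) + 1
--         cum.append(total)
--     j = sum(1 for c in cum if c <= max_length - 3)
--     return (' '.join(words[:j]) + ' ').strip() + '...'
-- ===== Notes on version B (the rewrite author's own statement) =====
-- stated objective: alternative
-- what changed: Replaces A's accumulating string-concatenation greedy loops with a prefix-sum table of segment costs: count how many cumulative sums fit the budget, then build the result once by joining that prefix of sentences (or words) with the separator.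
import Mathlib
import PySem

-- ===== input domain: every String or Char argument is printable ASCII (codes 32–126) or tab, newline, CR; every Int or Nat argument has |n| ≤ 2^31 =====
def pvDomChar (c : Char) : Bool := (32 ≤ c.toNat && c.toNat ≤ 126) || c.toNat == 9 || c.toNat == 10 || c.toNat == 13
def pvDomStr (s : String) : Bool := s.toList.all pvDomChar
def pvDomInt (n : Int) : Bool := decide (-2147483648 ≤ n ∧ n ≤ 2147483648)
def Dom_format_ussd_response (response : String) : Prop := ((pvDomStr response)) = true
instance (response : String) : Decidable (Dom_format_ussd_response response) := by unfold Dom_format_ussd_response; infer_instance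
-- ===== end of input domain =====

-- B rebuilds the truncation from a prefix-sum table of segment costs and a single join,
-- instead of A's accumulating concatenation loops; same return value, similar cost.

-- ===== PORT A =====
-- A's two 'for … : if len(acc + piece + sep) <= b: acc += piece + sep else: break' loops,
-- shared as one helper (sep/budget are the only differences between them).
def pvGreedyA (sep : List Char) (b : Int) : List (List Char) → List Char → List Char
  | [], acc => acc
  | s :: rest, acc =>
    if PySem.Chars.len (acc ++ s ++ sep) ≤ b then pvGreedyA sep b rest (acc ++ s ++ sep)
    else acc

def format_ussd_response (response : String) : String :=
  let max_length : Int := 120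
  let cs := response.toList
  if PySem.Chars.len cs ≤ max_length then response
  else
    let sentences := PySem.Chars.splitOn cs ". ".toList
    let f := pvGreedyA ". ".toList max_length sentences []
    let f :=
      if PySem.Chars.strip f = [] then
        let words := PySem.Chars.split₀ cs
        PySem.Chars.strip (pvGreedyA " ".toList (max_length - 3) words []) ++ "...".toList
      else f
    String.ofList (PySem.Chars.strip f)

-- ===== PORT B =====
-- Source B's 'total += len(s) + pad; cum.append(total)' table loop.
def pvCumB (pad : Int) (xs : List (List Char)) : List Int :=
  (xs.foldl (fun (p : List Int × Int) s =>
      (p.1 ++ [p.2 + PySem.Chars.len s + pad], p.2 + PySem.Chars.len s + pad)) ([], 0)).1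

def format_ussd_response_alt (response : String) : String :=
  let max_length : Int := 120
  let cs := response.toList
  if PySem.Chars.len cs ≤ max_length then response
  else
    let sentences := PySem.Chars.splitOn cs ". ".toList
    let k := (pvCumB 2 sentences).countP (fun c => decide (c ≤ max_length))
    if 0 < k then
      String.ofList (PySem.Chars.strip
        (PySem.Chars.join ". ".toList (sentences.take k) ++ ". ".toList))
    else
      let words := PySem.Chars.split₀ cs
      let j := (pvCumB 1 words).countP (fun c => decide (c ≤ max_length - 3))
      String.ofList (PySem.Chars.strip
        (PySem.Chars.join " ".toList (words.take j) ++ " ".toList) ++ "...".toList)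

-- ===== PRECONDITION & SPEC =====
def Spec_format_ussd_response (response : String) (out : String) : Prop := out = format_ussd_response_alt response
instance (response : String) (out : String) : Decidable (Spec_format_ussd_response response out) := by unfold Spec_format_ussd_response; infer_instance

-- ===== CLAIM (what is proved, stated in full; the proofs are below) =====
def Claim_equal_format_ussd_response : Prop := ∀ (response : String), Dom_format_ussd_response response → Spec_format_ussd_response response (format_ussd_response response)

-- ===== LEMMAS AND PROOFS =====

-- The cumulative-cost list that Source B's table loop builds, as a recursion.
def pvCumR (pad t : Int) : List (List Char) → List Int
  | [] => []
  | s :: r => (t + (s.length : Int) + pad) :: pvCumR pad (t + (s.length : Int) + pad) r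

theorem pvCumB_go (pad : Int) (xs : List (List Char)) :
    ∀ (acc : List Int) (t : Int),
      (xs.foldl (fun (p : List Int × Int) s =>
        (p.1 ++ [p.2 + PySem.Chars.len s + pad], p.2 + PySem.Chars.len s + pad)) (acc, t)).1
      = acc ++ pvCumR pad t xs := by
  induction xs with
  | nil => intro acc t; simp [pvCumR]
  | cons s r ih =>
    intro acc t
    simp only [List.foldl_cons]
    rw [ih]
    simp [pvCumR, PySem.Chars.len]

theorem pvCumB_eq (pad : Int) (xs : List (List Char)) :
    pvCumB pad xs = pvCumR pad 0 xs := by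
  simpa using pvCumB_go pad xs [] 0

theorem pvCumR_lt (pad t : Int) (hp : 1 ≤ pad) (xs : List (List Char)) :
    ∀ c ∈ pvCumR pad t xs, t < c := by
  induction xs generalizing t with
  | nil => simp [pvCumR]
  | cons s r ih =>
    intro c hc
    simp only [pvCumR, List.mem_cons] at hc
    rcases hc with rfl | hc
    · have : (0 : Int) ≤ (s.length : Int) := Int.natCast_nonneg _
      omega
    · have h1 := ih (t + (s.length : Int) + pad) c hc
      have : (0 : Int) ≤ (s.length : Int) := Int.natCast_nonneg _
      omega

theorem pvGreedyA_eq (sep : List Char) (hsep : 1 ≤ (sep.length : Int)) (b : Int)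
    (xs : List (List Char)) : ∀ (acc : List Char),
    pvGreedyA sep b xs acc
      = acc ++ ((xs.take ((pvCumR (sep.length : Int) (acc.length : Int) xs).countP
          (fun c => decide (c ≤ b)))).map (· ++ sep)).flatten := by
  induction xs with
  | nil => intro acc; simp [pvGreedyA, pvCumR]
  | cons s r ih =>
    intro acc
    simp only [pvGreedyA, PySem.Chars.len]
    by_cases h : ((acc ++ s ++ sep).length : Int) ≤ b
    · rw [if_pos h]
      have hc : (acc.length : Int) + (s.length : Int) + (sep.length : Int) ≤ b := by
        simp only [List.length_append, Nat.cast_add] at h; omega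
      simp only [pvCumR]
      rw [List.countP_cons_of_pos (by simpa using hc)]
      simp only [List.take_succ_cons, List.map_cons, List.flatten_cons]
      rw [ih (acc ++ s ++ sep)]
      have hlen : ((acc ++ s ++ sep).length : Int)
          = (acc.length : Int) + (s.length : Int) + (sep.length : Int) := by
        push_cast [List.length_append]; ring
      rw [hlen]
      simp [List.append_assoc]
    · rw [if_neg h]
      have hc : ¬ ((acc.length : Int) + (s.length : Int) + (sep.length : Int) ≤ b) := by
        intro hcon; apply h; push_cast [List.length_append]; omega
      have hzero : ((pvCumR (sep.length : Int) (acc.length : Int) (s :: r)).countP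
          (fun c => decide (c ≤ b))) = 0 := by
        rw [List.countP_eq_zero]
        intro c hcmem
        simp only [pvCumR, List.mem_cons] at hcmem
        simp only [decide_eq_true_eq]
        rcases hcmem with rfl | hcm
        · omega
        · have := pvCumR_lt (sep.length : Int)
            ((acc.length : Int) + (s.length : Int) + (sep.length : Int)) hsep r c hcm
          omega
      rw [hzero]
      simp

-- flatten of (· ++ sep)-mapped nonempty list = intercalate + trailing sep
theorem pvFlatten_sep (sep : List Char) (xs : List (List Char)) (h : xs ≠ []) :
    (xs.map (· ++ sep)).flatten = List.intercalate sep xs ++ sep := by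
  induction xs with
  | nil => exact absurd rfl h
  | cons s r ih =>
    cases r with
    | nil => simp [List.intercalate]
    | cons y t =>
      have h1 := ih (by simp)
      have h2 : List.intercalate sep (s :: y :: t)
          = s ++ sep ++ List.intercalate sep (y :: t) := by
        simp [List.intercalate]
      simp only [List.map_cons, List.flatten_cons] at h1 ⊢
      rw [h1, h2]
      simp [List.append_assoc]

theorem pvStrip_ne_nil (l : List Char) (c : Char) (hc : c ∈ l)
    (hs : PySem.Chars.isspace c = false) : PySem.Chars.strip l ≠ [] := by
  have h1 : c ∈ PySem.Chars.lstrip l := by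
    unfold PySem.Chars.lstrip
    have := List.takeWhile_append_dropWhile (p := PySem.Chars.isspace) (l := l)
    rw [← this] at hc
    rcases List.mem_append.1 hc with h | h
    · exact absurd (List.mem_takeWhile_imp h) (by simp [hs])
    · exact h
  have h2 : c ∈ PySem.Chars.strip l := by
    unfold PySem.Chars.strip PySem.Chars.rstrip
    rw [List.mem_reverse]
    have hc' : c ∈ (PySem.Chars.lstrip l).reverse := by simpa using h1
    have := List.takeWhile_append_dropWhile (p := PySem.Chars.isspace)
      (l := (PySem.Chars.lstrip l).reverse)
    rw [← this] at hc'
    rcases List.mem_append.1 hc' with h | h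
    · exact absurd (List.mem_takeWhile_imp h) (by simp [hs])
    · exact h
  exact List.ne_nil_of_mem h2

theorem pvLstrip_append (a b : List Char) :
    PySem.Chars.lstrip (a ++ b)
      = if PySem.Chars.lstrip a = [] then PySem.Chars.lstrip b
        else PySem.Chars.lstrip a ++ b := by
  unfold PySem.Chars.lstrip
  rw [List.dropWhile_append]
  split_ifs with h1 h2 h3 <;> simp_all

theorem pvRstrip_dots (l : List Char) :
    PySem.Chars.rstrip (l ++ ['.', '.', '.']) = l ++ ['.', '.', '.'] := by
  unfold PySem.Chars.rstrip
  have : (l ++ ['.', '.', '.']).reverse = '.' :: '.' :: '.' :: l.reverse := by simp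
  rw [this, List.dropWhile_cons_of_neg (by decide)]
  simp

theorem pvStrip_dots (l : List Char) :
    PySem.Chars.strip (l ++ ['.', '.', '.'])
      = PySem.Chars.lstrip l ++ ['.', '.', '.'] := by
  unfold PySem.Chars.strip
  rw [pvLstrip_append]
  by_cases h : PySem.Chars.lstrip l = []
  · rw [if_pos h, h]
    have : PySem.Chars.lstrip ['.', '.', '.'] = ['.', '.', '.'] := by decide
    rw [this]
    simpa using pvRstrip_dots []
  · rw [if_neg h]
    exact pvRstrip_dots _

-- rstrip gives a prefix, so lstrip is a no-op on a strip result
theorem pvLstrip_strip (l : List Char) :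
    PySem.Chars.lstrip (PySem.Chars.strip l) = PySem.Chars.strip l := by
  unfold PySem.Chars.strip
  set u := PySem.Chars.lstrip l with hu
  have hpre : PySem.Chars.rstrip u <+: u := by
    unfold PySem.Chars.rstrip
    rw [← List.reverse_suffix]
    simpa using List.dropWhile_suffix (p := PySem.Chars.isspace) (l := u.reverse)
  cases hr : PySem.Chars.rstrip u with
  | nil => simp [PySem.Chars.lstrip]
  | cons c rest =>
    have hcu : ∃ t, u = c :: (rest ++ t) := by
      rcases hpre with ⟨t, ht⟩
      rw [hr] at ht
      exact ⟨t, by simpa using ht.symm⟩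
    rcases hcu with ⟨t, ht⟩
    have hcns : PySem.Chars.isspace c = false := by
      have hdw : List.dropWhile PySem.Chars.isspace l = c :: (rest ++ t) := by
        have : PySem.Chars.lstrip l = c :: (rest ++ t) := by rw [← hu, ht]
        simpa [PySem.Chars.lstrip] using this
      have hne : List.dropWhile PySem.Chars.isspace l ≠ [] := by simp [hdw]
      have := List.head_dropWhile_not PySem.Chars.isspace hne
      simpa [hdw] using this
    rw [PySem.Chars.lstrip, List.dropWhile_cons_of_neg (by simp [hcns])]

-- strip of the word-loop accumulator equals strip (join ++ ' ')
theorem pvStripWords (ws : List (List Char)) :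
    PySem.Chars.strip ((ws.map (· ++ [' '])).flatten)
      = PySem.Chars.strip (PySem.Chars.join [' '] ws ++ [' ']) := by
  cases ws with
  | nil => simp [PySem.Chars.join, List.intercalate]; decide
  | cons w r =>
    rw [pvFlatten_sep [' '] (w :: r) (by simp)]
    rfl

-- ===== VERDICT (by name: the statement is the Claim_ definition above) =====
theorem format_ussd_response_spec : Claim_equal_format_ussd_response := by
  intro response _
  unfold Spec_format_ussd_response format_ussd_response format_ussd_response_alt
  simp only []
  by_cases hlen : PySem.Chars.len response.toList ≤ (120 : Int)
  · rw [if_pos hlen, if_pos hlen]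
  · rw [if_neg hlen, if_neg hlen]
    have hdot2 : ". ".toList = ['.', ' '] := by decide
    have hdots : "...".toList = ['.', '.', '.'] := by decide
    have hsp : " ".toList = [' '] := by decide
    rw [hdot2, hdots, hsp]
    have h117 : (120 : Int) - 3 = 117 := by norm_num
    rw [h117]
    set ss := PySem.Chars.splitOn response.toList ['.', ' '] with hss
    set ws := PySem.Chars.split₀ response.toList with hws
    have hA := pvGreedyA_eq ['.', ' '] (by decide) 120 ss []
    norm_num at hA
    rw [← List.map_take] at hA
    set k := (pvCumR 2 0 ss).countP (fun c => decide (c ≤ (120 : Int))) with hk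
    have hkB : (pvCumB 2 ss).countP (fun c => decide (c ≤ (120 : Int))) = k := by
      rw [pvCumB_eq]
    rw [hkB]
    have hW := pvGreedyA_eq [' '] (by decide) 117 ws []
    norm_num at hW
    rw [← List.map_take] at hW
    set j := (pvCumR 1 0 ws).countP (fun c => decide (c ≤ (117 : Int))) with hj
    have hjB : (pvCumB 1 ws).countP (fun c => decide (c ≤ (117 : Int))) = j := by
      rw [pvCumB_eq]
    rw [hjB]
    clear_value ss ws k j
    rcases Nat.eq_zero_or_pos k with hk0 | hkpos
    · -- nothing fits: both take the word branch
      rw [hk0] at hA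
      simp only [List.take_zero, List.map_nil, List.flatten_nil] at hA
      rw [hA]
      rw [if_pos (by decide : PySem.Chars.strip ([] : List Char) = [])]
      rw [if_neg (by omega : ¬ 0 < k)]
      rw [hW, pvStripWords, pvStrip_dots, pvLstrip_strip]
    · -- k sentences fit
      have hssne : ss ≠ [] := by
        intro hnil
        rw [hnil] at hk
        simp [pvCumR] at hk
        omega
      have htkne : ss.take k ≠ [] := by
        cases ss with
        | nil => exact absurd rfl hssne
        | cons a r =>
          cases k with
          | zero => omega
          | succ n => simp [List.take_succ_cons]
      have hdotmem : ('.' : Char) ∈ ((ss.take k).map (· ++ ['.', ' '])).flatten := by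
        cases hts : ss.take k with
        | nil => exact absurd hts htkne
        | cons a r => simp
      have hstripne : PySem.Chars.strip (pvGreedyA ['.', ' '] 120 ss []) ≠ [] := by
        rw [hA]
        exact pvStrip_ne_nil _ '.' hdotmem (by decide)
      rw [if_neg hstripne, if_pos hkpos]
      rw [hA, pvFlatten_sep ['.', ' '] (ss.take k) htkne]
      rfl
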